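-- pv_equiv track=rewrite | github.com/raekaaaa/Raeka-Repository | Set 4.py | telephone_decipher
-- ===== SOURCE A (Python) =====
-- def telephone_decipher(telephone_string):
--     decoder_dict = {
--         "0":" ",
--         '2': 'A',
--         '22': 'B',
--         '222': 'C',
--         '3': 'D',
--         '33': 'E',
--         '333': 'F',
--         '4': 'G',
--         '44': 'H',
--         '444': 'I',
--         '5': 'J',
--         '55': 'K',
--         '555': 'L',
--         '6': 'M',
--         '66': 'N',
--         '666': 'O',
--         '7': 'P',
--         '77': 'Q',
--         '777': 'R',
--         '7777': 'S',
--         '8': 'T',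
--         '88': 'U',
--         '888': 'V',
--         '9': 'W',
--         '99': 'X',
--         '999': 'Y',
--         '9999': 'Z'
--     }
--
--     result = ""
--     sections = telephone_string.split("_")
--     for part in sections:
--         i = 0
--         while i < len(part):
--             for length in range(4, 0, -1):  # Check from longest to shortest
--                 if part[i:i+length] in decoder_dict:
--                     result += decoder_dict[part[i:i+length]]
--                     i += length
--                     break
--     return result
-- ===== SOURCE B (Python) =====
-- # Run-length decode — group consecutive identical digits and emit one letter per
-- # chunk of up to cap(d) repeats, instead of A's greedy longest-key dict matching.
-- # On characters outside '_023456789' A loops forever; B raises KeyError (outside Pre_).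
-- def telephone_decipher(telephone_string):
--     CAP = {'0': 1, '2': 3, '3': 3, '4': 3, '5': 3, '6': 3, '7': 4, '8': 3, '9': 4}
--     BASE = {'2': 'A', '3': 'D', '4': 'G', '5': 'J', '6': 'M', '7': 'P', '8': 'T', '9': 'W'}
--
--     def decode(d, k):
--         if d == '0':
--             return ' '
--         return chr(ord(BASE[d]) + k - 1)
--
--     out = []
--     s = telephone_string
--     n = len(s)
--     i = 0
--     while i < n:
--         d = s[i]
--         j = i
--         while j < n and s[j] == d:
--             j += 1
--         if d != '_':
--             run = j - i
--             m = CAP[d]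
--             while run > 0:
--                 k = min(run, m)
--                 out.append(decode(d, k))
--                 run -= k
--         i = j
--     return ''.join(out)
-- ===== Notes on version B (the rewrite author's own statement) =====
-- stated objective: alternative
-- what changed: B decodes by run-length grouping (one pass over maximal runs of equal digits, emitting a letter per chunk of up to the key-length cap via character arithmetic) instead of A's split-then-greedy longest-prefix dictionary matching with string slicing; Pre_ excludes strings containing characters other than the underscore separator and the keypad digits (zero and two through nine), on which A loops forever (never returns) and B raises KeyError.
import Mathlib
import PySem

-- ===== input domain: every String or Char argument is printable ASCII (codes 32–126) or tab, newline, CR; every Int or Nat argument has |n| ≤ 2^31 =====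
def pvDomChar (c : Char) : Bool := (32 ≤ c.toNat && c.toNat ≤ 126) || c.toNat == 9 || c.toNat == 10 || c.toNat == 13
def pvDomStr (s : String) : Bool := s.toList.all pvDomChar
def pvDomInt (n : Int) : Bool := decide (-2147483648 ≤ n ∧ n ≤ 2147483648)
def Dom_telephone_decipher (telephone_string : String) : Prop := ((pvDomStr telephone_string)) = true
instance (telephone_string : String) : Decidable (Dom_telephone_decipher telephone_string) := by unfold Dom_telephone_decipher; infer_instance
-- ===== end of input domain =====

-- B re-implements the keypad decoding by run-length grouping + character arithmetic instead of
-- A's split-then-greedy longest-prefix dictionary matching; equal on Pre_ (A loops forever outside it).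

-- ===== PORT A =====
-- Python str keys/values of decoder_dict are represented as their code-point lists (exact).
def pvDecoder : PySem.Dict (List Char) (List Char) := PySem.Dict.ofList
  [(['0'], [' ']), (['2'], ['A']), (['2','2'], ['B']), (['2','2','2'], ['C']),
   (['3'], ['D']), (['3','3'], ['E']), (['3','3','3'], ['F']),
   (['4'], ['G']), (['4','4'], ['H']), (['4','4','4'], ['I']),
   (['5'], ['J']), (['5','5'], ['K']), (['5','5','5'], ['L']),
   (['6'], ['M']), (['6','6'], ['N']), (['6','6','6'], ['O']),
   (['7'], ['P']), (['7','7'], ['Q']), (['7','7','7'], ['R']), (['7','7','7','7'], ['S']),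
   (['8'], ['T']), (['8','8'], ['U']), (['8','8','8'], ['V']),
   (['9'], ['W']), (['9','9'], ['X']), (['9','9','9'], ['Y']), (['9','9','9','9'], ['Z'])]

-- the inner 'while i < len(part)' loop; the 'for length in range(4, 0, -1)' is unrolled as the
-- match chain (first hit breaks).  fuel ≥ number of iterations under Pre_ (each hit moves i by ≥ 1);
-- when no length matches, Python re-enters the while loop forever — excluded by Pre_, port returns result.
def pvAWhile (part : List Char) (fuel : Nat) (i : Nat) (result : List Char) : List Char :=
  match fuel with
  | 0 => result
  | fuel' + 1 =>
    if i < part.length then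
      match PySem.Dict.get? pvDecoder (PySem.List.slice part (some (i : Int)) (some ((i + 4 : Nat) : Int))) with
      | some v => pvAWhile part fuel' (i + 4) (result ++ v)
      | none =>
        match PySem.Dict.get? pvDecoder (PySem.List.slice part (some (i : Int)) (some ((i + 3 : Nat) : Int))) with
        | some v => pvAWhile part fuel' (i + 3) (result ++ v)
        | none =>
          match PySem.Dict.get? pvDecoder (PySem.List.slice part (some (i : Int)) (some ((i + 2 : Nat) : Int))) with
          | some v => pvAWhile part fuel' (i + 2) (result ++ v)
          | none =>
            match PySem.Dict.get? pvDecoder (PySem.List.slice part (some (i : Int)) (some ((i + 1 : Nat) : Int))) with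
            | some v => pvAWhile part fuel' (i + 1) (result ++ v)
            | none => result   -- Python loops forever here (excluded by Pre_)
    else result

def telephone_decipher (telephone_string : String) : String :=
  -- sections = telephone_string.split("_")  (sep ≠ "", so split? is always some)
  let sections := (PySem.Str.split? telephone_string "_").getD []
  String.mk (sections.foldl
    (fun result part => pvAWhile part.toList (part.toList.length + 1) 0 result) [])

-- ===== PORT B =====
def pvCap : PySem.Dict Char Nat := PySem.Dict.ofList
  [('0', 1), ('2', 3), ('3', 3), ('4', 3), ('5', 3), ('6', 3), ('7', 4), ('8', 3), ('9', 4)]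
def pvBase : PySem.Dict Char Char := PySem.Dict.ofList
  [('2', 'A'), ('3', 'D'), ('4', 'G'), ('5', 'J'), ('6', 'M'), ('7', 'P'), ('8', 'T'), ('9', 'W')]

def pvDecode (d : Char) (k : Nat) : List Char :=
  if d = '0' then [' ']
  else
    match PySem.Dict.get? pvBase d with
    | some b => [Char.ofNat (b.toNat + k - 1)]   -- chr(ord(BASE[d]) + k - 1)
    | none => []                                 -- Python: KeyError (excluded by Pre_)

-- the inner 'while run > 0' loop
def pvEmit (d : Char) (m : Nat) (run : Nat) (out : List Char) : List Char :=
  match run, m with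
  | 0, _ => out
  | _ + 1, 0 => out            -- unreachable: every value stored in pvCap is positive
  | r + 1, m' + 1 =>
    pvEmit d (m' + 1) (r + 1 - min (r + 1) (m' + 1)) (out ++ pvDecode d (min (r + 1) (m' + 1)))
  termination_by run
  decreasing_by omega

-- the outer 'while i < n' loop; the run scan 'while j < n and s[j] == d' is takeWhile/dropWhile
def pvGo (l : List Char) (out : List Char) : List Char :=
  match l with
  | [] => out
  | c :: rest =>
    if c = '_' then pvGo (rest.dropWhile (· == c)) out
    else
      match PySem.Dict.get? pvCap c with
      | some m => pvGo (rest.dropWhile (· == c)) (pvEmit c m ((rest.takeWhile (· == c)).length + 1) out)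
      | none => out            -- Python: KeyError (excluded by Pre_)
  termination_by l.length
  decreasing_by
  · exact Nat.lt_succ_of_le (List.length_dropWhile_le _ _)
  · exact Nat.lt_succ_of_le (List.length_dropWhile_le _ _)

def telephone_decipher_alt (telephone_string : String) : String :=
  String.mk (pvGo telephone_string.toList [])

-- ===== PRECONDITION & SPEC =====
def pvValid : List Char := ['0', '2', '3', '4', '5', '6', '7', '8', '9']

-- Pre_ excludes strings containing any character other than '_' and the digits 0,2..9:
-- on those A never returns (its inner for-loop matches nothing and the while loop spins forever).
def Pre_telephone_decipher (telephone_string : String) : Prop :=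
  telephone_string.toList.all (fun c => c == '_' || pvValid.contains c) = true
instance (telephone_string : String) : Decidable (Pre_telephone_decipher telephone_string) := by
  unfold Pre_telephone_decipher; infer_instance

def pvWitness_telephone_decipher : String := "4433555_9999"

def Spec_telephone_decipher (telephone_string : String) (out : String) : Prop :=
  out = telephone_decipher_alt telephone_string
instance (telephone_string : String) (out : String) : Decidable (Spec_telephone_decipher telephone_string out) := by
  unfold Spec_telephone_decipher; infer_instance

-- ===== CLAIM (what is proved, stated in full; the proofs are below) =====
def Claim_equal_telephone_decipher : Prop :=
  ∀ (telephone_string : String), Dom_telephone_decipher telephone_string →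
    Pre_telephone_decipher telephone_string →
    Spec_telephone_decipher telephone_string (telephone_decipher telephone_string)

-- ===== LEMMAS AND PROOFS =====

-- longest key length per digit (4 for '7'/'9', 1 for '0', else 3)
def pvCapF (c : Char) : Nat := if c = '0' then 1 else if c = '7' ∨ c = '9' then 4 else 3

lemma pvCapF_pos (c : Char) : 1 ≤ pvCapF c := by unfold pvCapF; split_ifs <;> omega
lemma pvCapF_le4 (c : Char) : pvCapF c ≤ 4 := by unfold pvCapF; split_ifs <;> omega

-- what one maximal run of n copies of c decodes to
def pvChunks (c : Char) : Nat → List Char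
  | 0 => []
  | n + 1 => pvDecode c (min (n + 1) (pvCapF c)) ++ pvChunks c (n + 1 - min (n + 1) (pvCapF c))
  termination_by n => n
  decreasing_by have := pvCapF_pos c; omega

-- chunk-at-a-time reading of a '_'-free section (mirrors A's greedy stepping)
def pvG : List Char → List Char
  | [] => []
  | c :: rest =>
    pvDecode c (min ((rest.takeWhile (· == c)).length + 1) (pvCapF c)) ++
      pvG (rest.drop (min ((rest.takeWhile (· == c)).length + 1) (pvCapF c) - 1))
  termination_by l => l.length
  decreasing_by simpa using Nat.lt_succ_of_le (List.length_drop_le _ _)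

-- run-at-a-time reading of the whole string (mirrors B)
def pvF : List Char → List Char
  | [] => []
  | c :: rest =>
    if c = '_' then pvF (rest.dropWhile (· == c))
    else pvChunks c ((rest.takeWhile (· == c)).length + 1) ++ pvF (rest.dropWhile (· == c))
  termination_by l => l.length
  decreasing_by all_goals exact Nat.lt_succ_of_le (List.length_dropWhile_le _ _)

-- accumulator-free reading of Chars.splitOn s ['_']
def pvSp : List Char → List Char → List (List Char)
  | [], cur => [cur.reverse]
  | c :: rest, cur => if c = '_' then cur.reverse :: pvSp rest [] else pvSp rest (c :: cur)

lemma pvSplitOn_go_eq (fuel : Nat) (l cur : List Char) (acc : List (List Char)) (h : l.length < fuel) :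
    PySem.Chars.splitOn.go ['_'] fuel l cur acc = acc.reverse ++ pvSp l cur := by
  induction fuel generalizing l cur acc with
  | zero => omega
  | succ f ih =>
    cases l with
    | nil => simp [PySem.Chars.splitOn.go, pvSp]
    | cons c rest =>
      simp only [PySem.Chars.splitOn.go, List.isPrefixOf, Bool.and_true]
      by_cases hc : c = '_'
      · subst hc
        simp only [beq_self_eq_true, if_pos]
        rw [ih _ _ _ (by simpa using Nat.lt_of_succ_lt_succ h)]
        simp [pvSp]
      · have hb : ('_' == c) = false := by simpa using fun h' => hc h'.symm
        simp only [hb, if_neg Bool.false_ne_true]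
        rw [ih _ _ _ (by simpa using Nat.lt_of_succ_lt_succ h)]
        simp [pvSp, hc]

lemma pvCap_get {c : Char} (hc : c ∈ pvValid) : PySem.Dict.get? pvCap c = some (pvCapF c) := by
  fin_cases hc <;> decide

lemma pvDecoder_replicate {c : Char} (hc : c ∈ pvValid) {k : Nat} (h1 : 1 ≤ k) (h4 : k ≤ 4) :
    PySem.Dict.get? pvDecoder (List.replicate k c) =
      if k ≤ pvCapF c then some (pvDecode c k) else none := by
  fin_cases hc <;> interval_cases k <;> decide

lemma pvDecoder_mixed {c : Char} (hc : c ∈ pvValid) {c' : Char} (hne : c' ≠ c)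
    {r : Nat} (h1 : 1 ≤ r) (h3 : r ≤ 3) (tail : List Char) :
    PySem.Dict.get? pvDecoder (List.replicate r c ++ c' :: tail) = none := by
  have hD : pvDecoder = PySem.Dict.mk (κ := List Char) (ν := List Char)
    [(['0'], [' ']), (['2'], ['A']), (['2','2'], ['B']), (['2','2','2'], ['C']),
     (['3'], ['D']), (['3','3'], ['E']), (['3','3','3'], ['F']),
     (['4'], ['G']), (['4','4'], ['H']), (['4','4','4'], ['I']),
     (['5'], ['J']), (['5','5'], ['K']), (['5','5','5'], ['L']),
     (['6'], ['M']), (['6','6'], ['N']), (['6','6','6'], ['O']),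
     (['7'], ['P']), (['7','7'], ['Q']), (['7','7','7'], ['R']), (['7','7','7','7'], ['S']),
     (['8'], ['T']), (['8','8'], ['U']), (['8','8','8'], ['V']),
     (['9'], ['W']), (['9','9'], ['X']), (['9','9','9'], ['Y']), (['9','9','9','9'], ['Z'])] := by decide
  fin_cases hc <;> interval_cases r <;>
    simp [hD, PySem.Dict.get?, List.replicate, hne, Ne.symm hne]

lemma pvTakeWhile_rep (l : List Char) (c : Char) :
    l.takeWhile (· == c) = List.replicate (l.takeWhile (· == c)).length c := by
  induction l with
  | nil => simp
  | cons a rest ih =>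
    by_cases h : a = c
    · subst h; simpa [List.takeWhile_cons, List.replicate_succ] using ih
    · simp [h]

lemma pvRunDecomp (c : Char) (rest : List Char) :
    c :: rest = List.replicate ((rest.takeWhile (· == c)).length + 1) c ++ rest.dropWhile (· == c) := by
  conv_lhs => rw [← List.takeWhile_append_dropWhile (p := (· == c)) (l := rest)]
  rw [List.replicate_succ]
  simp [← pvTakeWhile_rep]

lemma pvTw_rep_stop (c : Char) (z : List Char) (hz : ∀ x, z.head? = some x → x ≠ c) :
    ∀ n, (List.replicate n c ++ z).takeWhile (· == c) = List.replicate n c ∧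
         (List.replicate n c ++ z).dropWhile (· == c) = z := by
  intro n
  induction n with
  | zero =>
    simp only [List.replicate_zero, List.nil_append]
    cases z with
    | nil => simp
    | cons x t =>
      have := hz x (by simp)
      simp [List.takeWhile_cons, List.dropWhile_cons, this]
  | succ n ih => simp [List.replicate_succ, ih]

lemma pvLookup_take (c : Char) (rest : List Char) (hc : c ∈ pvValid)
    (l : Nat) (h1 : 1 ≤ l) (h4 : l ≤ 4) :
    PySem.Dict.get? pvDecoder ((c :: rest).take l) =
      if min l (rest.length + 1) ≤ min ((rest.takeWhile (· == c)).length + 1) (pvCapF c)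
      then some (pvDecode c (min l (rest.length + 1))) else none := by
  set r1 := (rest.takeWhile (· == c)).length with hr1
  have hr1le : r1 ≤ rest.length := by
    simpa [hr1] using (List.takeWhile_sublist (p := (· == c)) (l := rest)).length_le
  set z := rest.dropWhile (· == c) with hzdef
  have hdec : c :: rest = List.replicate (r1 + 1) c ++ z := pvRunDecomp c rest
  have hlen : rest.length + 1 = (r1 + 1) + z.length := by
    have := congrArg List.length hdec; simpa using this
  have hzx : ∀ x, z.head? = some x → x ≠ c := by
    intro x hx
    have h2 := List.head?_dropWhile_not (· == c) rest
    rw [← hzdef, hx] at h2; simpa using h2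
  by_cases hu : min l (rest.length + 1) ≤ r1 + 1
  · have hkey : (c :: rest).take l = List.replicate (min l (rest.length + 1)) c := by
      rcases (by omega : l ≤ r1 + 1 ∨ r1 + 1 < l) with hlr | hlr
      · rw [hdec, List.take_append]
        simp only [List.length_replicate, List.take_replicate,
          Nat.sub_eq_zero_of_le hlr, List.take_zero, List.append_nil]
        congr 1; omega
      · have hz0 : z = [] := by
          have : z.length = 0 := by omega
          simpa [List.length_eq_zero_iff] using this
        rw [hdec, hz0, List.append_nil, List.take_replicate]
        congr 1; omega
    rw [hkey, pvDecoder_replicate hc (by omega) (by omega)]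
    split_ifs <;> first | rfl | (exfalso; omega)
  · replace hu : r1 + 1 < min l (rest.length + 1) := by omega
    have hz : z ≠ [] := by
      intro h0; rw [h0] at hlen; simp at hlen; omega
    obtain ⟨x, t, hxt⟩ := List.exists_cons_of_ne_nil hz
    have hxc : x ≠ c := hzx x (by rw [hxt]; rfl)
    have hkey : (c :: rest).take l =
        List.replicate (r1 + 1) c ++ x :: t.take (l - (r1 + 1) - 1) := by
      rw [hdec, hxt, List.take_append]
      simp only [List.length_replicate, List.take_replicate,
        min_eq_right (by omega : r1 + 1 ≤ l)]
      congr 1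
      rw [show l - (r1 + 1) = (l - (r1 + 1) - 1) + 1 by omega]
      rfl
    rw [hkey, pvDecoder_mixed hc hxc (by omega) (by omega), if_neg (by omega)]

lemma pvAWhile_eq (part : List Char) (hv : ∀ c ∈ part, c ∈ pvValid) :
    ∀ fuel i res, part.length - i < fuel →
      pvAWhile part fuel i res = res ++ pvG (part.drop i) := by
  intro fuel
  induction fuel with
  | zero => intro i res h; omega
  | succ f ih =>
    intro i res h
    by_cases hi : i < part.length
    · obtain ⟨c, rest, hS⟩ : ∃ c rest, part.drop i = c :: rest := by
        cases hS : part.drop i with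
        | nil =>
          exfalso
          have := congrArg List.length hS
          simp at this; omega
        | cons c rest => exact ⟨c, rest, rfl⟩
      have hc : c ∈ pvValid := hv c (List.drop_subset i part (hS ▸ List.mem_cons_self))
      have hlenS : rest.length + 1 = part.length - i := by
        have := congrArg List.length hS
        simp at this; omega
      have hr1 : (rest.takeWhile (· == c)).length ≤ rest.length :=
        (List.takeWhile_sublist (p := (· == c)) (l := rest)).length_le
      have hcap4 : pvCapF c ≤ 4 := pvCapF_le4 c
      have hcap1 : 1 ≤ pvCapF c := pvCapF_pos c
      have hsl : ∀ L : Nat, PySem.List.slice part (some (i : Int)) (some ((i + L : Nat) : Int))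
          = (c :: rest).take L := by
        intro L
        rw [PySem.List.slice_natCast, ← hS]
        congr 1; omega
      have hdropL : ∀ L : Nat, 1 ≤ L →
          min L (rest.length + 1) = min ((rest.takeWhile (· == c)).length + 1) (pvCapF c) →
          part.drop (i + L)
            = rest.drop (min ((rest.takeWhile (· == c)).length + 1) (pvCapF c) - 1) := by
        intro L hL1 hLM
        rw [← List.drop_drop (i := L) (j := i), hS,
          show L = (L - 1) + 1 by omega, List.drop_succ_cons]
        rcases (by omega : L - 1 = min ((rest.takeWhile (· == c)).length + 1) (pvCapF c) - 1
            ∨ (rest.length ≤ L - 1 ∧ rest.length ≤ min ((rest.takeWhile (· == c)).length + 1) (pvCapF c) - 1)) with hh | hh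
        · rw [hh]
        · rw [List.drop_eq_nil_of_le hh.1, List.drop_eq_nil_of_le hh.2]
      simp only [pvAWhile, if_pos hi, hsl 4, hsl 3, hsl 2, hsl 1,
        pvLookup_take c rest hc 4 (by omega) (by omega),
        pvLookup_take c rest hc 3 (by omega) (by omega),
        pvLookup_take c rest hc 2 (by omega) (by omega),
        pvLookup_take c rest hc 1 (by omega) (by omega)]
      rw [hS, pvG]
      by_cases h4 : min 4 (rest.length + 1) ≤ min ((rest.takeWhile (· == c)).length + 1) (pvCapF c)
      · have hm : min 4 (rest.length + 1) = min ((rest.takeWhile (· == c)).length + 1) (pvCapF c) := by omega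
        rw [if_pos h4]; dsimp only
        rw [ih (i + 4) (res ++ pvDecode c (min 4 (rest.length + 1))) (by omega),
              hdropL 4 (by omega) hm, hm, List.append_assoc]
      · rw [if_neg h4]; dsimp only
        by_cases h3 : min 3 (rest.length + 1) ≤ min ((rest.takeWhile (· == c)).length + 1) (pvCapF c)
        · have hm : min 3 (rest.length + 1) = min ((rest.takeWhile (· == c)).length + 1) (pvCapF c) := by omega
          rw [if_pos h3]; dsimp only
          rw [ih (i + 3) (res ++ pvDecode c (min 3 (rest.length + 1))) (by omega),
              hdropL 3 (by omega) hm, hm, List.append_assoc]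
        · rw [if_neg h3]; dsimp only
          by_cases h2 : min 2 (rest.length + 1) ≤ min ((rest.takeWhile (· == c)).length + 1) (pvCapF c)
          · have hm : min 2 (rest.length + 1) = min ((rest.takeWhile (· == c)).length + 1) (pvCapF c) := by omega
            rw [if_pos h2]; dsimp only
            rw [ih (i + 2) (res ++ pvDecode c (min 2 (rest.length + 1))) (by omega),
              hdropL 2 (by omega) hm, hm, List.append_assoc]
          · rw [if_neg h2]; dsimp only
            have h1 : min 1 (rest.length + 1) ≤ min ((rest.takeWhile (· == c)).length + 1) (pvCapF c) := by omega
            have hm : min 1 (rest.length + 1) = min ((rest.takeWhile (· == c)).length + 1) (pvCapF c) := by omega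
            rw [if_pos h1]; dsimp only
            rw [ih (i + 1) (res ++ pvDecode c (min 1 (rest.length + 1))) (by omega),
              hdropL 1 (by omega) hm, hm, List.append_assoc]
    · have hnil : part.drop i = [] := List.drop_eq_nil_of_le (by omega)
      simp [pvAWhile, hi, hnil, pvG]

lemma pvEmit_eq (c : Char) (n : Nat) : ∀ out, pvEmit c (pvCapF c) n out = out ++ pvChunks c n := by
  induction n using Nat.strong_induction_on with
  | _ n ih =>
    intro out
    obtain ⟨m', hm'⟩ : ∃ m', pvCapF c = m' + 1 := ⟨pvCapF c - 1, by have := pvCapF_pos c; omega⟩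
    cases n with
    | zero => simp [pvEmit, pvChunks]
    | succ k =>
      rw [pvChunks, hm', pvEmit, ← hm',
        ih (k + 1 - min (k + 1) (pvCapF c)) (by have := pvCapF_pos c; omega)
          (out ++ pvDecode c (min (k + 1) (pvCapF c))), List.append_assoc]

lemma pvDw_head (c : Char) (rest : List Char) :
    ∀ x, (rest.dropWhile (· == c)).head? = some x → x ≠ c := by
  intro x hx
  have h2 := List.head?_dropWhile_not (· == c) rest
  rw [hx] at h2; simpa using h2

lemma pvGo_eq_aux : ∀ (N : Nat) (l : List Char), l.length ≤ N →
    (∀ c ∈ l, c = '_' ∨ c ∈ pvValid) → ∀ out, pvGo l out = out ++ pvF l := by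
  intro N
  induction N with
  | zero =>
    intro l hl hv out
    have : l = [] := List.length_eq_zero_iff.mp (by omega)
    subst this; simp [pvGo, pvF]
  | succ N ihN =>
    intro l hl hv out
    cases l with
    | nil => simp [pvGo, pvF]
    | cons c rest =>
      have hsub : (rest.dropWhile (· == c)).length ≤ N := by
        have := List.length_dropWhile_le (· == c) rest
        simp at hl; omega
      have hvsub : ∀ x ∈ rest.dropWhile (· == c), x = '_' ∨ x ∈ pvValid := fun x hx =>
        hv x (List.mem_cons_of_mem _ ((List.dropWhile_sublist _).subset hx))
      by_cases hc : c = '_'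
      · simp only [pvGo, pvF, if_pos hc]
        exact ihN _ hsub hvsub out
      · have hcv : c ∈ pvValid := (hv c List.mem_cons_self).resolve_left hc
        simp only [pvGo, pvF, if_neg hc, pvCap_get hcv]
        rw [pvEmit_eq c _ out, ihN _ hsub hvsub, List.append_assoc]

lemma pvGo_eq (l : List Char) (hv : ∀ c ∈ l, c = '_' ∨ c ∈ pvValid) :
    ∀ out, pvGo l out = out ++ pvF l :=
  pvGo_eq_aux l.length l le_rfl hv

lemma pvG_run (c : Char) (n : Nat) :
    ∀ rest2, (∀ x, rest2.head? = some x → x ≠ c) →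
      pvG (List.replicate n c ++ rest2) = pvChunks c n ++ pvG rest2 := by
  induction n using Nat.strong_induction_on with
  | _ n ih =>
    intro rest2 hz
    cases n with
    | zero => simp [pvChunks]
    | succ k =>
      have hM1 : 1 ≤ min (k + 1) (pvCapF c) := by have := pvCapF_pos c; omega
      rw [List.replicate_succ, List.cons_append, pvG]
      simp only [(pvTw_rep_stop c rest2 hz k).1, List.length_replicate,
        List.drop_append, List.drop_replicate]
      rw [Nat.sub_eq_zero_of_le (by omega : min (k + 1) (pvCapF c) - 1 ≤ k), List.drop_zero,
        show k - (min (k + 1) (pvCapF c) - 1) = (k + 1) - min (k + 1) (pvCapF c) by omega,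
        ih ((k + 1) - min (k + 1) (pvCapF c)) (by omega) rest2 hz,
        pvChunks, List.append_assoc]

lemma pvG_eq_F_aux : ∀ (N : Nat) (l : List Char), l.length ≤ N → '_' ∉ l →
    (∀ c ∈ l, c ∈ pvValid) → pvG l = pvF l := by
  intro N
  induction N with
  | zero =>
    intro l hl hu hv
    have : l = [] := List.length_eq_zero_iff.mp (by omega)
    subst this; simp [pvG, pvF]
  | succ N ihN =>
    intro l hl hu hv
    cases l with
    | nil => simp [pvG, pvF]
    | cons c rest =>
      have hc : c ∈ pvValid := hv c List.mem_cons_self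
      have hcu : ¬ c = '_' := fun h => hu (h ▸ List.mem_cons_self)
      have hz := pvDw_head c rest
      have hsub : (rest.dropWhile (· == c)).length ≤ N := by
        have := List.length_dropWhile_le (· == c) rest
        simp at hl; omega
      have hmem : ∀ x ∈ rest.dropWhile (· == c), x ∈ rest :=
        fun x hx => (List.dropWhile_sublist _).subset hx
      have hG : pvG (c :: rest) = pvChunks c ((rest.takeWhile (· == c)).length + 1) ++
          pvG (rest.dropWhile (· == c)) := by
        conv_lhs => rw [pvRunDecomp c rest]
        exact pvG_run c _ _ hz
      rw [hG, pvF, if_neg hcu,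
        ihN _ hsub (fun h => hu (List.mem_cons_of_mem _ (hmem _ h)))
          (fun x hx => hv x (List.mem_cons_of_mem _ (hmem _ hx)))]

lemma pvG_eq_F (l : List Char) (hu : '_' ∉ l) (hv : ∀ c ∈ l, c ∈ pvValid) :
    pvG l = pvF l :=
  pvG_eq_F_aux l.length l le_rfl hu hv

lemma pvF_underscore (t : List Char) : pvF (t.dropWhile (· == '_')) = pvF t := by
  cases t with
  | nil => simp
  | cons x t' =>
    by_cases hx : x = '_'
    · subst hx
      rw [List.dropWhile_cons_of_pos (by simp)]
      conv_rhs => rw [pvF, if_pos rfl]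
    · rw [List.dropWhile_cons_of_neg (by simpa using hx)]

lemma pvF_append_sep_aux : ∀ (N : Nat) (sec t : List Char), sec.length ≤ N → '_' ∉ sec →
    pvF (sec ++ '_' :: t) = pvF sec ++ pvF t := by
  intro N
  induction N with
  | zero =>
    intro sec t hl hu
    have : sec = [] := List.length_eq_zero_iff.mp (by omega)
    subst this
    rw [List.nil_append]
    conv_lhs => rw [pvF]
    rw [if_pos rfl, pvF_underscore]
    simp [pvF]
  | succ N ihN =>
    intro sec t hl hu
    cases sec with
    | nil =>
      rw [List.nil_append]
      conv_lhs => rw [pvF]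
      rw [if_pos rfl, pvF_underscore]
      simp [pvF]
    | cons c sec' =>
      have hcu : ¬ c = '_' := fun h => hu (h ▸ List.mem_cons_self)
      have hb : ('_' == c) = false := by simpa using fun h => hcu h.symm
      have htw : (sec' ++ '_' :: t).takeWhile (· == c) = sec'.takeWhile (· == c) := by
        rw [List.takeWhile_append]
        split_ifs with hh
        · rw [List.takeWhile_cons_of_neg (by simpa using hb), List.append_nil]
          exact ((List.takeWhile_prefix _).eq_of_length hh).symm
        · rfl
      have hdw : (sec' ++ '_' :: t).dropWhile (· == c) = sec'.dropWhile (· == c) ++ '_' :: t := by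
        rw [List.dropWhile_append]
        split_ifs with hh
        · rw [List.dropWhile_cons_of_neg (by simpa using hb),
            List.isEmpty_iff.mp hh, List.nil_append]
        · rfl
      have hsub : (sec'.dropWhile (· == c)).length ≤ N := by
        have := List.length_dropWhile_le (· == c) sec'
        simp at hl; omega
      have husub : '_' ∉ sec'.dropWhile (· == c) := fun h =>
        hu (List.mem_cons_of_mem _ ((List.dropWhile_sublist _).subset h))
      rw [List.cons_append, pvF, if_neg hcu, htw, hdw, ihN _ t hsub husub,
        pvF, if_neg hcu, List.append_assoc]

lemma pvSp_char (l cur : List Char) :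
    pvSp l cur = (cur.reverse ++ l.takeWhile (fun c => c != '_')) ::
      (match l.dropWhile (fun c => c != '_') with
       | [] => []
       | _ :: t => pvSp t []) := by
  induction l generalizing cur with
  | nil => simp [pvSp]
  | cons c rest ih =>
    by_cases hc : c = '_'
    · subst hc
      simp [pvSp, List.takeWhile_cons, List.dropWhile_cons]
    · have hb : (c != '_') = true := by simpa using hc
      simp only [pvSp, if_neg hc, ih (c :: cur), List.takeWhile_cons, List.dropWhile_cons, hb,
        if_pos, List.reverse_cons, List.append_assoc, List.cons_append, List.nil_append]

lemma pvSp_valid : ∀ (l cur : List Char), (∀ c ∈ l, c = '_' ∨ c ∈ pvValid) →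
    (∀ c ∈ cur, c ∈ pvValid) → ∀ p ∈ pvSp l cur, ∀ c ∈ p, c ∈ pvValid := by
  intro l
  induction l with
  | nil =>
    intro cur hv hcur p hp c hcp
    simp [pvSp] at hp
    subst hp
    exact hcur c (by simpa using hcp)
  | cons a rest ih =>
    intro cur hv hcur p hp c hcp
    have hv' : ∀ c ∈ rest, c = '_' ∨ c ∈ pvValid := fun x hx => hv x (List.mem_cons_of_mem _ hx)
    by_cases ha : a = '_'
    · subst ha
      have hstep : pvSp ('_' :: rest) cur = cur.reverse :: pvSp rest [] := by simp [pvSp]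
      rw [hstep, List.mem_cons] at hp
      rcases hp with hp | hp
      · subst hp; exact hcur c (by simpa using hcp)
      · exact ih [] hv' (by simp) p hp c hcp
    · have hav : a ∈ pvValid := (hv a List.mem_cons_self).resolve_left ha
      simp only [pvSp, if_neg ha] at hp
      refine ih (a :: cur) hv' ?_ p hp c hcp
      intro x hx
      rcases List.mem_cons.mp hx with h | h
      · exact h ▸ hav
      · exact hcur x h

lemma pvSp_flatten_aux : ∀ (N : Nat) (l : List Char), l.length ≤ N →
    (∀ c ∈ l, c = '_' ∨ c ∈ pvValid) → ((pvSp l []).map pvG).flatten = pvF l := by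
  intro N
  induction N with
  | zero =>
    intro l hl hv
    have : l = [] := List.length_eq_zero_iff.mp (by omega)
    subst this; simp [pvSp, pvG, pvF]
  | succ N ihN =>
    intro l hl hv
    rw [pvSp_char]
    have hnotun : ∀ x ∈ l.takeWhile (fun c => c != '_'), x ≠ '_' := by
      intro x hx
      have := List.mem_takeWhile_imp hx
      simpa using this
    have htwv : ∀ c ∈ l.takeWhile (fun c => c != '_'), c ∈ pvValid := by
      intro x hx
      exact ((hv x ((List.takeWhile_sublist _).subset hx)).resolve_left (hnotun x hx))
    have hGF : pvG (l.takeWhile (fun c => c != '_')) = pvF (l.takeWhile (fun c => c != '_')) :=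
      pvG_eq_F _ (fun h => hnotun _ h rfl) htwv
    cases hd : l.dropWhile (fun c => c != '_') with
    | nil =>
      have htw : l.takeWhile (fun c => c != '_') = l :=
        List.takeWhile_eq_self_iff.mpr (List.dropWhile_eq_nil_iff.mp hd)
      simp only [hd, List.map_cons, List.map_nil, List.flatten_cons, List.flatten_nil,
        List.append_nil, List.reverse_nil, List.nil_append]
      rw [htw]
      rw [htw] at hGF
      exact hGF
    | cons x t =>
      have hx : x = '_' := by
        have h2 := List.head?_dropWhile_not (fun c => c != '_') l
        rw [hd] at h2
        simpa using h2
      subst hx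
      have hl2 : l = l.takeWhile (fun c => c != '_') ++ '_' :: t := by
        conv_lhs => rw [← List.takeWhile_append_dropWhile (p := fun c => c != '_') (l := l)]
        rw [hd]
      have hlen : t.length ≤ N := by
        have := congrArg List.length hl2
        simp at this; omega
      have htv : ∀ c ∈ t, c = '_' ∨ c ∈ pvValid := by
        intro c hc
        exact hv c (by rw [hl2]; exact List.mem_append_right _ (List.mem_cons_of_mem _ hc))
      simp only [List.map_cons, List.flatten_cons, List.reverse_nil, List.nil_append]
      rw [hGF, ihN t hlen htv, ← pvF_append_sep_aux (l.takeWhile (fun c => c != '_')).length _ t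
        le_rfl (fun h => hnotun _ h rfl), ← hl2]

lemma pvSp_flatten (l : List Char) (hv : ∀ c ∈ l, c = '_' ∨ c ∈ pvValid) :
    ((pvSp l []).map pvG).flatten = pvF l :=
  pvSp_flatten_aux l.length l le_rfl hv

lemma pvFoldl_sections (parts : List (List Char))
    (hv : ∀ p ∈ parts, ∀ c ∈ p, c ∈ pvValid) :
    ∀ r0, parts.foldl (fun r p => pvAWhile p (p.length + 1) 0 r) r0
      = r0 ++ (parts.map pvG).flatten := by
  induction parts with
  | nil => intro r0; simp
  | cons p ps ih =>
    intro r0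
    have hp : pvAWhile p (p.length + 1) 0 r0 = r0 ++ pvG p := by
      rw [pvAWhile_eq p (hv p List.mem_cons_self) (p.length + 1) 0 r0 (by omega), List.drop_zero]
    rw [List.foldl_cons, hp, ih (fun q hq => hv q (List.mem_cons_of_mem _ hq)),
      List.map_cons, List.flatten_cons, List.append_assoc]

-- ===== VERDICT (by name: the statement is the Claim_ definition above) =====
theorem telephone_decipher_spec : Claim_equal_telephone_decipher := by
  intro s hdom hpre
  unfold Spec_telephone_decipher telephone_decipher telephone_decipher_alt
  have hsplit := PySem.Str.split?_map s "_"
  cases hsp : PySem.Str.split? s "_" with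
  | none => rw [hsp] at hsplit; simp [PySem.Chars.split?] at hsplit
  | some secs =>
    rw [hsp] at hsplit
    simp only [Option.map_some, PySem.Chars.split?, List.isEmpty_iff] at hsplit
    rw [if_neg (by simp : ¬ ("_" : String).toList = [])] at hsplit
    have hparts : secs.map String.toList = pvSp s.toList [] := by
      have := Option.some.inj hsplit
      rw [show ("_" : String).toList = ['_'] from by decide] at this
      rw [this, PySem.Chars.splitOn,
        pvSplitOn_go_eq (s.toList.length + 1) s.toList [] [] (by omega)]
      simp
    have hpre' : ∀ c ∈ s.toList, c = '_' ∨ c ∈ pvValid := by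
      intro c hc
      have := List.all_eq_true.mp hpre c hc
      simpa [pvValid] using this
    have hv' : ∀ p ∈ pvSp s.toList [], ∀ c ∈ p, c ∈ pvValid :=
      pvSp_valid s.toList [] hpre' (by simp)
    simp only [hsp, Option.getD_some]
    have hfold : secs.foldl
        (fun result part => pvAWhile part.toList (part.toList.length + 1) 0 result) ([] : List Char)
        = (secs.map String.toList).foldl (fun r q => pvAWhile q (q.length + 1) 0 r) [] :=
      by rw [List.foldl_map]
    rw [hfold, hparts, pvFoldl_sections _ hv' [], List.nil_append, pvSp_flatten _ hpre',
      pvGo_eq s.toList hpre' [], List.nil_append]
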